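-- pv_equiv track=rewrite | github.com/toolchainlabs/toolchain-oss | src/python/toolchain/satresolver/pypi/python_graph.py | get_darwin_arches
-- ===== SOURCE A (Python) =====
-- from collections import OrderedDict
--
-- def get_darwin_arches(major, minor, machine):
--     """Return a list of supported arches (including group arches) for the given major, minor and machine architecture of
--     an macOS machine."""
--     # From https://github.com/pypa/pip/blob/master/src/pip/_internal/pep425tags.py
--     arches = []
--
--     def _supports_arch(arch):
--         # Looking at the application support for macOS versions in the chart
--         # provided by https://en.wikipedia.org/wiki/OS_X#Versions it appears
--         # our timeline looks roughly like:
--         #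
--         # 10.0 - Introduces ppc support.
--         # 10.4 - Introduces ppc64, i386, and x86_64 support, however the ppc64
--         #        and x86_64 support is CLI only, and cannot be used for GUI
--         #        applications.
--         # 10.5 - Extends ppc64 and x86_64 support to cover GUI applications.
--         # 10.6 - Drops support for ppc64
--         # 10.7 - Drops support for ppc
--         #
--         # Given that we do not know if we're installing a CLI or a GUI
--         # application, we must be conservative and assume it might be a GUI
--         # application and behave as if ppc64 and x86_64 support did not occur
--         # until 10.5.
--         #
--         # Note: The above information is taken from the "Application support"
--         #       column in the chart not the "Processor support" since I believe
--         #       that we care about what instruction sets an application can use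
--         #       not which processors the OS supports.
--         if arch == "ppc":
--             return (major, minor) <= (10, 5)
--         if arch == "ppc64":
--             return (major, minor) == (10, 5)
--         if arch == "i386":
--             return (major, minor) >= (10, 4)
--         if arch == "x86_64":
--             return (major, minor) >= (10, 5)
--         return arch in groups and any(_supports_arch(ga) for ga in groups[arch])
--
--     groups = OrderedDict(
--         [
--             ("fat", ("i386", "ppc")),
--             ("intel", ("x86_64", "i386")),
--             ("fat64", ("x86_64", "ppc64")),
--             ("fat32", ("x86_64", "i386", "ppc")),
--         ]
--     )
--
--     if _supports_arch(machine):
--         arches.append(machine)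
--
--     for garch in groups:
--         if machine in groups[garch] and _supports_arch(garch):
--             arches.append(garch)
--
--     arches.append("universal")
--
--     return arches
-- ===== SOURCE B (Python) =====
-- def get_darwin_arches(major, minor, machine):
--     """Return a list of supported arches (including group arches) for the given major, minor and machine architecture of
--     an macOS machine."""
--     # Classify the version into one of four eras, each with its fixed set of
--     # supported base arches; an arch (base or group) is then supported iff its
--     # member set intersects that era set.  No per-arch version predicates and
--     # no recursion are needed.
--     if (major, minor) < (10, 4):
--         era = {"ppc"}
--     elif (major, minor) == (10, 4):
--         era = {"ppc", "i386"}
--     elif (major, minor) == (10, 5):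
--         era = {"ppc", "ppc64", "i386", "x86_64"}
--     else:
--         era = {"i386", "x86_64"}
--
--     # ordered member table: base arches first (singleton member sets), then groups
--     members = [
--         ("ppc", ("ppc",)),
--         ("ppc64", ("ppc64",)),
--         ("i386", ("i386",)),
--         ("x86_64", ("x86_64",)),
--         ("fat", ("i386", "ppc")),
--         ("intel", ("x86_64", "i386")),
--         ("fat64", ("x86_64", "ppc64")),
--         ("fat32", ("x86_64", "i386", "ppc")),
--     ]
--     table = dict(members)
--
--     arches = []
--     if not era.isdisjoint(table.get(machine, ())):
--         arches.append(machine)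
--     for garch, mem in members[4:]:
--         if machine in mem and not era.isdisjoint(mem):
--             arches.append(garch)
--     arches.append("universal")
--     return arches
-- ===== Notes on version B (the rewrite author's own statement) =====
-- stated objective: alternative
-- what changed: B replaces A's per-arch version predicates with recursion through the group table by a version-era classification: the version is mapped once to one of four fixed supported-base-arch sets and every arch (base or group) is decided by intersecting its member set with that era set over a single ordered member table.
import Mathlib
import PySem

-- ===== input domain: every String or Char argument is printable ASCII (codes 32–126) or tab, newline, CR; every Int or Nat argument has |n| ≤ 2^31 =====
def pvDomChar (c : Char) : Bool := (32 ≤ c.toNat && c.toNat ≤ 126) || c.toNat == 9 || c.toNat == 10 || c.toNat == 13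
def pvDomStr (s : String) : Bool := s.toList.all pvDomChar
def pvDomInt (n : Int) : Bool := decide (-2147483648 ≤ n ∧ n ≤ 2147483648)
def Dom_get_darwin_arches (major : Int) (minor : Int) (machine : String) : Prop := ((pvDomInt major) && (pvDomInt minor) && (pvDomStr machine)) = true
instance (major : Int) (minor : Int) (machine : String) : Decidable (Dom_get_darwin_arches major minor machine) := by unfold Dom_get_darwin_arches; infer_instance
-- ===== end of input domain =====

-- B classifies the version once into one of four eras, each with a fixed supported-base-arch set,
-- and decides every arch by intersecting its member set with that era set over one ordered member
-- table, instead of A's per-arch version predicates with recursion through the group table;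
-- objective: alternative (same O(1) cost, no recursion and no per-arch comparisons).

-- ===== PORT A =====
-- groups = OrderedDict([...])
def pvGroupsA : PySem.Dict String (List String) :=
  PySem.Dict.mk
    [("fat", ["i386", "ppc"]), ("intel", ["x86_64", "i386"]),
     ("fat64", ["x86_64", "ppc64"]), ("fat32", ["x86_64", "i386", "ppc"])]

-- _supports_arch; the recursion through group members is made total by a fuel parameter
-- (2 is enough: groups only contain base arches, so recursion depth is at most 2).
-- Python tuple comparisons like (major, minor) <= (10, 5) are ported as explicit lexicographic
-- comparisons on the two Ints (exact for int components).
def pvSupportsA : Nat → Int → Int → String → Bool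
  | 0, _, _, _ => false
  | fuel + 1, major, minor, arch =>
    if arch == "ppc" then (major < 10 || (major == 10 && minor ≤ 5))
    else if arch == "ppc64" then (major == 10 && minor == 5)
    else if arch == "i386" then (major > 10 || (major == 10 && minor ≥ 4))
    else if arch == "x86_64" then (major > 10 || (major == 10 && minor ≥ 5))
    else pvGroupsA.contains arch &&
      (pvGroupsA.getD arch []).any (fun ga => pvSupportsA fuel major minor ga)

def get_darwin_arches (major : Int) (minor : Int) (machine : String) : List String :=
  let arches : List String := []
  let arches := if pvSupportsA 2 major minor machine then arches ++ [machine] else arches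
  let arches := pvGroupsA.keys.foldl
    (fun acc garch =>
      if (pvGroupsA.getD garch []).contains machine && pvSupportsA 2 major minor garch
      then acc ++ [garch] else acc) arches
  arches ++ ["universal"]

-- ===== PORT B =====
-- the four version eras with their supported base-arch sets (Python set literals → PySem.Set;
-- the tuple comparisons are again ported as explicit lexicographic Int comparisons)
def pvEraB (major minor : Int) : PySem.Set String :=
  if major < 10 || (major == 10 && minor < 4) then PySem.Set.ofList ["ppc"]
  else if major == 10 && minor == 4 then PySem.Set.ofList ["ppc", "i386"]
  else if major == 10 && minor == 5 then PySem.Set.ofList ["ppc", "ppc64", "i386", "x86_64"]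
  else PySem.Set.ofList ["i386", "x86_64"]

-- ordered member table: base arches first (singleton member sets), then groups
def pvMembersB : List (String × List String) :=
  [("ppc", ["ppc"]), ("ppc64", ["ppc64"]), ("i386", ["i386"]), ("x86_64", ["x86_64"]),
   ("fat", ["i386", "ppc"]), ("intel", ["x86_64", "i386"]),
   ("fat64", ["x86_64", "ppc64"]), ("fat32", ["x86_64", "i386", "ppc"])]

-- not era.isdisjoint(mem)
def pvHitsB (era : PySem.Set String) (mem : List String) : Bool :=
  !(PySem.Set.isdisjoint era mem)

def get_darwin_arches_alt (major : Int) (minor : Int) (machine : String) : List String :=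
  let era := pvEraB major minor
  let table := PySem.Dict.mk pvMembersB
  let arches : List String := []
  let arches := if pvHitsB era (table.getD machine []) then arches ++ [machine] else arches
  let arches := (pvMembersB.drop 4).foldl
    (fun acc gm => if gm.2.contains machine && pvHitsB era gm.2 then acc ++ [gm.1] else acc)
    arches
  arches ++ ["universal"]

-- ===== PRECONDITION & SPEC =====
def Spec_get_darwin_arches (major : Int) (minor : Int) (machine : String) (out : List String) : Prop := out = get_darwin_arches_alt major minor machine
instance (major : Int) (minor : Int) (machine : String) (out : List String) : Decidable (Spec_get_darwin_arches major minor machine out) := by unfold Spec_get_darwin_arches; infer_instance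

-- ===== CLAIM (what is proved, stated in full; the proofs are below) =====
def Claim_equal_get_darwin_arches : Prop := ∀ (major : Int) (minor : Int) (machine : String), Dom_get_darwin_arches major minor machine → Spec_get_darwin_arches major minor machine (get_darwin_arches major minor machine)

-- ===== LEMMAS AND PROOFS =====

-- any machine that is none of the eight known arch names yields ["universal"] on both sides
theorem default_eq (major minor : Int) (machine : String)
    (h0 : machine ≠ "ppc") (h1 : machine ≠ "ppc64") (h2 : machine ≠ "i386") (h3 : machine ≠ "x86_64")
    (h4 : machine ≠ "fat") (h5 : machine ≠ "intel") (h6 : machine ≠ "fat64") (h7 : machine ≠ "fat32") :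
    get_darwin_arches major minor machine = get_darwin_arches_alt major minor machine := by
  have e0 : (machine == "ppc") = false := by simp [h0]
  have f0 : ("ppc" == machine) = false := by simp [Ne.symm h0]
  have e1 : (machine == "ppc64") = false := by simp [h1]
  have f1 : ("ppc64" == machine) = false := by simp [Ne.symm h1]
  have e2 : (machine == "i386") = false := by simp [h2]
  have f2 : ("i386" == machine) = false := by simp [Ne.symm h2]
  have e3 : (machine == "x86_64") = false := by simp [h3]
  have f3 : ("x86_64" == machine) = false := by simp [Ne.symm h3]
  have e4 : (machine == "fat") = false := by simp [h4]
  have f4 : ("fat" == machine) = false := by simp [Ne.symm h4]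
  have e5 : (machine == "intel") = false := by simp [h5]
  have f5 : ("intel" == machine) = false := by simp [Ne.symm h5]
  have e6 : (machine == "fat64") = false := by simp [h6]
  have f6 : ("fat64" == machine) = false := by simp [Ne.symm h6]
  have e7 : (machine == "fat32") = false := by simp [h7]
  have f7 : ("fat32" == machine) = false := by simp [Ne.symm h7]
  simp only [get_darwin_arches, get_darwin_arches_alt, pvSupportsA, pvHitsB, pvMembersB,
    pvGroupsA, PySem.Dict.getD, PySem.Dict.get?, PySem.Dict.contains, PySem.Dict.keys,
    PySem.Dict.mk, List.find?, List.foldl_cons, List.foldl_nil,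
    List.map_cons, List.map_nil, List.drop, List.contains_cons, List.contains_nil, List.any_cons,
    List.any_nil, Option.map, Option.getD,
    e0, e1, e2, e3, e4, e5, e6, e7, f0, f1, f2, f3, f4, f5, f6, f7]
  simp [PySem.Set.isdisjoint, h0, h1, h2, h3, h4, h5, h6, h7]

theorem main_eq (major minor : Int) (machine : String) :
    get_darwin_arches major minor machine = get_darwin_arches_alt major minor machine := by
  by_cases hdef : machine = "ppc" ∨ machine = "ppc64" ∨ machine = "i386" ∨ machine = "x86_64" ∨
      machine = "fat" ∨ machine = "intel" ∨ machine = "fat64" ∨ machine = "fat32"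
  · rcases lt_trichotomy major 10 with hM | hM | hM
    · have a1 : (decide (major < 10)) = true := by simp [hM]
      have a2 : (major == 10) = false := by simp; omega
      have a3 : (decide (major > 10)) = false := by simp; omega
      rcases hdef with h | h | h | h | h | h | h | h <;> subst h <;>
        simp only [get_darwin_arches, get_darwin_arches_alt, pvEraB, pvSupportsA, pvHitsB,
          pvMembersB, pvGroupsA, a1, a2, a3, Bool.true_or, Bool.false_or, Bool.false_and,
          Bool.and_false, Bool.or_false, Bool.true_and] <;> decide
    · subst hM
      rcases (show minor ≤ 3 ∨ minor = 4 ∨ minor = 5 ∨ 6 ≤ minor by omega) with hm | hm | hm | hm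
      · have m1 : (decide (minor ≤ 5)) = true := by simp; omega
        have m2 : (minor == 5) = false := by simp; omega
        have m3 : (minor == 4) = false := by simp; omega
        have m4 : (decide (minor ≥ 4)) = false := by simp; omega
        have m5 : (decide (minor ≥ 5)) = false := by simp; omega
        have m6 : (decide (minor < 4)) = true := by simp; omega
        rcases hdef with h | h | h | h | h | h | h | h <;> subst h <;>
          simp only [get_darwin_arches, get_darwin_arches_alt, pvEraB, pvSupportsA, pvHitsB,
            pvMembersB, pvGroupsA, m1, m2, m3, m4, m5, m6, Bool.true_or, Bool.false_or,
            Bool.false_and, Bool.and_false, Bool.or_false, Bool.true_and] <;> decide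
      · subst hm
        rcases hdef with h | h | h | h | h | h | h | h <;> subst h <;> decide
      · subst hm
        rcases hdef with h | h | h | h | h | h | h | h <;> subst h <;> decide
      · have m1 : (decide (minor ≤ 5)) = false := by simp; omega
        have m2 : (minor == 5) = false := by simp; omega
        have m3 : (minor == 4) = false := by simp; omega
        have m4 : (decide (minor ≥ 4)) = true := by simp; omega
        have m5 : (decide (minor ≥ 5)) = true := by simp; omega
        have m6 : (decide (minor < 4)) = false := by simp; omega
        rcases hdef with h | h | h | h | h | h | h | h <;> subst h <;>
          simp only [get_darwin_arches, get_darwin_arches_alt, pvEraB, pvSupportsA, pvHitsB,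
            pvMembersB, pvGroupsA, m1, m2, m3, m4, m5, m6, Bool.true_or, Bool.false_or,
            Bool.false_and, Bool.and_false, Bool.or_false, Bool.true_and] <;> decide
    · have a1 : (decide (major < 10)) = false := by simp; omega
      have a2 : (major == 10) = false := by simp; omega
      have a3 : (decide (major > 10)) = true := by simp [hM]
      rcases hdef with h | h | h | h | h | h | h | h <;> subst h <;>
        simp only [get_darwin_arches, get_darwin_arches_alt, pvEraB, pvSupportsA, pvHitsB,
          pvMembersB, pvGroupsA, a1, a2, a3, Bool.true_or, Bool.false_or, Bool.false_and,
          Bool.and_false, Bool.or_false, Bool.true_and] <;> decide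
  · push_neg at hdef
    obtain ⟨h0, h1, h2, h3, h4, h5, h6, h7⟩ := hdef
    exact default_eq major minor machine h0 h1 h2 h3 h4 h5 h6 h7

-- ===== VERDICT (by name: the statement is the Claim_ definition above) =====
theorem get_darwin_arches_spec : Claim_equal_get_darwin_arches := by
  intro major minor machine _
  exact main_eq major minor machine
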